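-- pv_equiv track=rewrite | github.com/Ayushhgit/DisAgent | MainAgent/core/runtime/dependency_graph.py | dependency_closure
-- ===== SOURCE A (Python) =====
-- from typing import List, Dict, Set
--
-- def reverse_graph(graph: Dict[str, List[str]]) -> Dict[str, Set[str]]:
--     rev: Dict[str, Set[str]] = {k: set() for k in graph}
--     for src, targets in graph.items():
--         for t in targets:
--             if t not in rev:
--                 rev[t] = set()
--             rev[t].add(src)
--     return rev
--
-- def dependency_closure(graph: Dict[str, List[str]], seeds: List[str], depth: int = 1) -> Set[str]:
--     """Return set of files that are in the dependency closure of `seeds` up to `depth` hops.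
--
--     This follows reverse dependencies: files that (directly or indirectly) depend on seeds.
--     """
--     rev = reverse_graph(graph)
--     result: Set[str] = set()
--     frontier = set(seeds)
--     for _ in range(depth):
--         next_frontier: Set[str] = set()
--         for f in frontier:
--             deps = rev.get(f, set())
--             for d in deps:
--                 if d not in result:
--                     next_frontier.add(d)
--         result.update(next_frontier)
--         frontier = next_frontier
--         if not frontier:
--             break
--     return result
-- ===== SOURCE B (Python) =====
-- def dependency_closure(graph, seeds, depth=1):
--     """Bounded-depth reverse-dependency closure, without prebuilding a reverse index:
--     each hop scans the forward graph for sources pointing into the frontier."""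
--     result = set()
--     frontier = list(dict.fromkeys(seeds))
--     for _ in range(depth):
--         nxt = []
--         for f in frontier:
--             for src, targets in graph.items():
--                 if f in targets and src not in result and src not in nxt:
--                     nxt.append(src)
--         result.update(nxt)
--         frontier = nxt
--         if not nxt:
--             break
--     return result
-- ===== Notes on version B (the rewrite author's own statement) =====
-- stated objective: simpler
-- what changed: B drops the reverse_graph prebuilt reverse index entirely and instead, on each hop, scans the forward graph for sources whose target list meets the frontier.
import Mathlib
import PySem

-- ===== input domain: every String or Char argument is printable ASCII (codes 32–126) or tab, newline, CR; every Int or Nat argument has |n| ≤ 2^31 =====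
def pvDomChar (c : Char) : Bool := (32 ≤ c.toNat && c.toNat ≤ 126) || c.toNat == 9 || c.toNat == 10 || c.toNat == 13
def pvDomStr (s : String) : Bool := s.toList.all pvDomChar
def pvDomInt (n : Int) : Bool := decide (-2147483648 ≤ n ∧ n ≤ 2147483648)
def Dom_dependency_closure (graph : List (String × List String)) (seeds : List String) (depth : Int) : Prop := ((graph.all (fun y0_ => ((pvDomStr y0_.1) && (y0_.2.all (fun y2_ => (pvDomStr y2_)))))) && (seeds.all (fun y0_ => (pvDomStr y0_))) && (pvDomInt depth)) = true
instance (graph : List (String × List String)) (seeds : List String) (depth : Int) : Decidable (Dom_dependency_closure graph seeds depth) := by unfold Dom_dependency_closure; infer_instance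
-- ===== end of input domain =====

-- B drops the prebuilt reverse index: each hop scans the forward graph for sources pointing into the frontier (objective: simpler).


-- ===== PORT A =====
-- rev[t].add(src) for each t in targets, creating rev[t] if absent
def pvRevInner (src : String) (d : PySem.Dict String (PySem.Set String)) (ts : List String) : PySem.Dict String (PySem.Set String) :=
  ts.foldl (fun d t =>
    let d := if d.contains t then d else d.insert t PySem.Set.empty
    d.modify t PySem.Set.empty (fun s => PySem.Set.add s src)) d

def reverse_graph (graph : List (String × List String)) : PySem.Dict String (PySem.Set String) :=
  let rev := graph.foldl (fun d p => d.insert p.1 PySem.Set.empty) PySem.Dict.empty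
  graph.foldl (fun d p => pvRevInner p.1 d p.2) rev

-- one hop: for f in frontier: for d in rev.get(f, set()): if d not in result: next_frontier.add(d)
def pvANext (rev : PySem.Dict String (PySem.Set String)) (result : PySem.Set String) (frontier : PySem.Set String) : PySem.Set String :=
  frontier.foldl (fun nf f =>
    (rev.getD f PySem.Set.empty).foldl (fun nf d =>
      if d ∈ result then nf else PySem.Set.add nf d) nf) PySem.Set.empty

-- for _ in range(depth): … ; if not frontier: break   (range(depth) = depth.toNat iterations)
def pvALoop (rev : PySem.Dict String (PySem.Set String)) (result frontier : PySem.Set String) : Nat → PySem.Set String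
  | 0 => result
  | n + 1 =>
    let nf := pvANext rev result frontier
    let result := PySem.Set.update result nf
    if nf = [] then result else pvALoop rev result nf n

def dependency_closure (graph : List (String × List String)) (seeds : List String) (depth : Int) : List String :=
  let rev := reverse_graph graph
  pvALoop rev PySem.Set.empty (PySem.Set.ofList seeds) depth.toNat

-- ===== PORT B =====
-- one hop: scan the forward graph for sources with a target in the frontier
def pvBNext (graph : List (String × List String)) (result : PySem.Set String) (frontier : List String) : List String :=
  frontier.foldl (fun nxt f =>
    graph.foldl (fun nxt p =>
      if f ∈ p.2 ∧ p.1 ∉ result ∧ p.1 ∉ nxt then nxt ++ [p.1] else nxt) nxt) []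

def pvBLoop (graph : List (String × List String)) (result : PySem.Set String) (frontier : List String) : Nat → PySem.Set String
  | 0 => result
  | n + 1 =>
    let nxt := pvBNext graph result frontier
    let result := PySem.Set.update result nxt
    if nxt = [] then result else pvBLoop graph result nxt n

def dependency_closure_alt (graph : List (String × List String)) (seeds : List String) (depth : Int) : List String :=
  pvBLoop graph PySem.Set.empty (PySem.List.dedup seeds) depth.toNat

-- ===== PRECONDITION & SPEC =====
def Spec_dependency_closure (graph : List (String × List String)) (seeds : List String) (depth : Int) (out : List String) : Prop := out = dependency_closure_alt graph seeds depth
instance (graph : List (String × List String)) (seeds : List String) (depth : Int) (out : List String) : Decidable (Spec_dependency_closure graph seeds depth out) := by unfold Spec_dependency_closure; infer_instance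

-- ===== CLAIM (what is proved, stated in full; the proofs are below) =====
def Claim_equal_dependency_closure : Prop := ∀ (graph : List (String × List String)) (seeds : List String) (depth : Int), Dom_dependency_closure graph seeds depth → Spec_dependency_closure graph seeds depth (dependency_closure graph seeds depth)

-- ===== LEMMAS AND PROOFS =====

-- the srcs reachable backwards from f in one hop, as A's reverse index stores them
def pvSrcs (graph : List (String × List String)) (f : String) : PySem.Set String :=
  graph.foldl (fun s p => if f ∈ p.2 then PySem.Set.add s p.1 else s) PySem.Set.empty

lemma pvRevInner_getD (src : String) (ts : List String) :
    ∀ d : PySem.Dict String (PySem.Set String), ∀ x,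
      (pvRevInner src d ts).getD x PySem.Set.empty =
        if x ∈ ts then PySem.Set.add (d.getD x PySem.Set.empty) src
        else d.getD x PySem.Set.empty := by
  have step : ∀ (d : PySem.Dict String (PySem.Set String)) (t x : String),
      ((let d' := if d.contains t then d else d.insert t PySem.Set.empty
        d'.modify t PySem.Set.empty (fun s => PySem.Set.add s src)).getD x PySem.Set.empty) =
        if x = t then PySem.Set.add (d.getD t PySem.Set.empty) src else d.getD x PySem.Set.empty := by
    intro d t x
    have hpres : ∀ y, ((if d.contains t then d else d.insert t PySem.Set.empty).getD y PySem.Set.empty) = d.getD y PySem.Set.empty := by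
      intro y
      by_cases hc : d.contains t
      · simp [hc]
      · simp only [hc, if_false, Bool.false_eq_true]
        rw [PySem.Dict.getD_insert]
        by_cases hy : y = t
        · subst hy
          rw [PySem.Dict.getD_of_not_contains d PySem.Set.empty (by simpa using hc)]
          simp
        · simp [hy]
    simp only []
    rw [PySem.Dict.getD_modify, hpres, hpres]
  induction ts with
  | nil => intro d x; simp [pvRevInner]
  | cons t rest ih =>
    intro d x
    simp only [pvRevInner, List.foldl_cons] at ih ⊢
    rw [ih, step]
    by_cases hxt : x = t
    · subst hxt
      by_cases hxr : x ∈ rest <;> simp [hxr]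
    · by_cases hxr : x ∈ rest <;> simp [hxr, hxt]

lemma pvRev0_getD (graph : List (String × List String)) :
    ∀ d : PySem.Dict String (PySem.Set String), ∀ x, d.getD x PySem.Set.empty = PySem.Set.empty →
      (graph.foldl (fun d p => d.insert p.1 PySem.Set.empty) d).getD x PySem.Set.empty = PySem.Set.empty := by
  induction graph with
  | nil => intro d x h; simpa using h
  | cons p rest ih =>
    intro d x h
    simp only [List.foldl_cons]
    apply ih
    rw [PySem.Dict.getD_insert]
    split_ifs <;> first | rfl | exact h

lemma pvRev_getD (graph : List (String × List String)) (f : String) :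
    (reverse_graph graph).getD f PySem.Set.empty = pvSrcs graph f := by
  have main : ∀ (g : List (String × List String)) (d : PySem.Dict String (PySem.Set String)),
      ((g.foldl (fun d p => pvRevInner p.1 d p.2) d).getD f PySem.Set.empty) =
        g.foldl (fun s p => if f ∈ p.2 then PySem.Set.add s p.1 else s) (d.getD f PySem.Set.empty) := by
    intro g
    induction g with
    | nil => intro d; simp
    | cons p rest ih =>
      intro d
      simp only [List.foldl_cons]
      rw [ih, pvRevInner_getD]
  unfold reverse_graph pvSrcs
  rw [main]
  rw [pvRev0_getD graph PySem.Dict.empty f (by simp [PySem.Dict.getD_empty])]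

-- crux: folding A's per-frontier-node step over the stored src-set equals B's forward scan,
-- together with a membership invariant for B's accumulator
lemma pv_crux (R : PySem.Set String) (f : String) (graph : List (String × List String)) :
    ∀ nf : PySem.Set String,
      ((pvSrcs graph f).foldl (fun nf d => if d ∈ R then nf else PySem.Set.add nf d) nf =
        graph.foldl (fun nxt p =>
          if f ∈ p.2 ∧ p.1 ∉ R ∧ p.1 ∉ nxt then nxt ++ [p.1] else nxt) nf)
      ∧ ∀ x, x ∈ graph.foldl (fun nxt p =>
          if f ∈ p.2 ∧ p.1 ∉ R ∧ p.1 ∉ nxt then nxt ++ [p.1] else nxt) nf ↔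
          x ∈ nf ∨ (x ∈ pvSrcs graph f ∧ x ∉ R) := by
  induction graph using List.reverseRecOn with
  | nil =>
    intro nf
    refine ⟨by simp [pvSrcs], fun x => by simp [pvSrcs, PySem.Set.empty]⟩
  | append_singleton gs p ih =>
    intro nf
    obtain ⟨ihEq, ihMem⟩ := ih nf
    have hS : pvSrcs (gs ++ [p]) f =
        if f ∈ p.2 then PySem.Set.add (pvSrcs gs f) p.1 else pvSrcs gs f := by
      simp [pvSrcs, List.foldl_append]
    rw [hS]
    simp only [List.foldl_append, List.foldl_cons, List.foldl_nil]
    rw [← ihEq]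
    by_cases hf : f ∈ p.2
    · simp only [hf, if_true, true_and]
      by_cases hmem : p.1 ∈ pvSrcs gs f
      · have hadd : PySem.Set.add (pvSrcs gs f) p.1 = pvSrcs gs f := by
          simp [PySem.Set.add, PySem.Set.contains, hmem]
        rw [hadd]
        have hcond : ¬ (p.1 ∉ R ∧ p.1 ∉ (pvSrcs gs f).foldl (fun nf d => if d ∈ R then nf else PySem.Set.add nf d) nf) := by
          rintro ⟨hR, hnf⟩
          exact hnf (by rw [ihEq]; exact (ihMem p.1).mpr (Or.inr ⟨hmem, hR⟩))
        rw [if_neg hcond]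
        refine ⟨rfl, fun x => ?_⟩
        rw [ihEq]
        constructor
        · intro h; rcases (ihMem x).mp h with h' | ⟨h1, h2⟩
          · exact Or.inl h'
          · exact Or.inr ⟨h1, h2⟩
        · intro h; apply (ihMem x).mpr; tauto
      · have hadd : PySem.Set.add (pvSrcs gs f) p.1 = pvSrcs gs f ++ [p.1] := by
          simp [PySem.Set.add, PySem.Set.contains, hmem]
        rw [hadd]
        rw [List.foldl_append]
        simp only [List.foldl_cons, List.foldl_nil]
        set nfA := (pvSrcs gs f).foldl (fun nf d => if d ∈ R then nf else PySem.Set.add nf d) nf with hnfA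
        by_cases hR : p.1 ∈ R
        · rw [if_pos hR]
          have : ¬ (p.1 ∉ R ∧ p.1 ∉ nfA) := fun h => h.1 hR
          rw [if_neg this]
          refine ⟨rfl, fun x => ?_⟩
          rw [ihEq] at *
          constructor
          · intro h; rcases (ihMem x).mp h with h' | ⟨h1, h2⟩
            · exact Or.inl h'
            · exact Or.inr ⟨List.mem_append_left _ h1, h2⟩
          · rintro (h | ⟨h1, h2⟩)
            · exact (ihMem x).mpr (Or.inl h)
            · rcases List.mem_append.mp h1 with h1 | h1
              · exact (ihMem x).mpr (Or.inr ⟨h1, h2⟩)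
              · simp only [List.mem_singleton] at h1; subst h1; exact absurd hR h2
        · rw [if_neg hR]
          by_cases hn : p.1 ∈ nfA
          · have hadd2 : PySem.Set.add nfA p.1 = nfA := by
              simp [PySem.Set.add, PySem.Set.contains, hn]
            rw [hadd2]
            have : ¬ (p.1 ∉ R ∧ p.1 ∉ nfA) := fun h => h.2 hn
            rw [if_neg this]
            refine ⟨rfl, fun x => ?_⟩
            rw [ihEq] at *
            constructor
            · intro h; rcases (ihMem x).mp h with h' | ⟨h1, h2⟩
              · exact Or.inl h'
              · exact Or.inr ⟨List.mem_append_left _ h1, h2⟩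
            · rintro (h | ⟨h1, h2⟩)
              · exact (ihMem x).mpr (Or.inl h)
              · rcases List.mem_append.mp h1 with h1 | h1
                · exact (ihMem x).mpr (Or.inr ⟨h1, h2⟩)
                · simp only [List.mem_singleton] at h1; subst h1
                  exact hn
          · have hadd2 : PySem.Set.add nfA p.1 = nfA ++ [p.1] := by
              simp [PySem.Set.add, PySem.Set.contains, hn]
            rw [hadd2]
            have : (p.1 ∉ R ∧ p.1 ∉ nfA) := ⟨hR, hn⟩
            rw [if_pos this]
            refine ⟨rfl, fun x => ?_⟩
            rw [ihEq] at hn ⊢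
            constructor
            · intro h
              rcases List.mem_append.mp h with h | h
              · rcases (ihMem x).mp h with h' | ⟨h1, h2⟩
                · exact Or.inl h'
                · exact Or.inr ⟨List.mem_append_left _ h1, h2⟩
              · simp only [List.mem_singleton] at h; subst h
                exact Or.inr ⟨List.mem_append_right _ (List.mem_singleton_self _), hR⟩
            · rintro (h | ⟨h1, h2⟩)
              · exact List.mem_append_left _ ((ihMem x).mpr (Or.inl h))
              · rcases List.mem_append.mp h1 with h1 | h1
                · exact List.mem_append_left _ ((ihMem x).mpr (Or.inr ⟨h1, h2⟩))
                · simp only [List.mem_singleton] at h1; subst h1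
                  exact List.mem_append_right _ (List.mem_singleton_self _)
    · simp only [hf, false_and, if_false]
      refine ⟨by first | rfl | trivial, fun x => by rw [ihEq]; exact ihMem x⟩

lemma pvNext_eq (graph : List (String × List String)) (R : PySem.Set String) (F : List String) :
    pvANext (reverse_graph graph) R F = pvBNext graph R F := by
  unfold pvANext pvBNext
  exact PySem.List.foldl_congr_mem F
    (fun nf f => ((reverse_graph graph).getD f PySem.Set.empty).foldl
      (fun nf d => if d ∈ R then nf else PySem.Set.add nf d) nf)
    (fun nxt f => graph.foldl
      (fun nxt p => if f ∈ p.2 ∧ p.1 ∉ R ∧ p.1 ∉ nxt then nxt ++ [p.1] else nxt) nxt)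
    PySem.Set.empty
    (fun acc f _ => by simp only []; rw [pvRev_getD]; exact (pv_crux R f graph acc).1)

lemma pvLoop_eq (graph : List (String × List String)) :
    ∀ (n : Nat) (R F : PySem.Set String),
      pvALoop (reverse_graph graph) R F n = pvBLoop graph R F n := by
  intro n
  induction n with
  | zero => intro R F; rfl
  | succ rest ih =>
    intro R F
    simp only [pvALoop, pvBLoop]
    rw [pvNext_eq]
    by_cases h : pvBNext graph R F = []
    · simp [h]
    · simp only [h, if_false]
      exact ih _ _

-- ===== VERDICT (by name: the statement is the Claim_ definition above) =====
theorem dependency_closure_spec : Claim_equal_dependency_closure := by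
  intro graph seeds depth _
  unfold Spec_dependency_closure dependency_closure dependency_closure_alt
  rw [PySem.List.dedup_eq_ofList]
  exact pvLoop_eq graph _ _ _
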